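-- pv_equiv track=rewrite | github.com/enrique-yoab/Cubo-Rubik | intelligent_analysis/smart_search_for_cruz.py | actualizar_disponibilidad
-- ===== SOURCE A (Python) =====
-- def actualizar_disponibilidad(lugares_dispo, lugar_mod, sentido):
--     centros = [(1,0),(0,1),(1,2),(2,1)]
--     acomodar = []
--     actualizado = []
--
--     if lugar_mod in lugares_dispo:
--         lugares_dispo.remove(lugar_mod)
--
--     for centro in centros:
--         if centro not in lugares_dispo:
--             acomodar.append("W")  #esta ocupado
--         else:
--             acomodar.append("E")  #esta libre
--
--     # Rotar la lista de estados según el sentido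
--     if sentido == 1 :
--         # Rotar a la derecha: el último elemento pasa al principio
--         acomodar = [acomodar[-1]] + acomodar[:-1]
--     elif sentido == 0 :
--         # Rotar a la izquierda: el primer elemento pasa al final
--         acomodar = acomodar[1:] + [acomodar[0]]
--
--     for k in range(len(acomodar)):
--         if acomodar[k] == 'E':
--             actualizado.append(centros[k])
--         else:
--             #no guardamos los centros ocupados
--             continue
--
--     return actualizado
-- ===== SOURCE B (Python) =====
-- def actualizar_disponibilidad(lugares_dispo, lugar_mod, sentido):
--     # Same guarded in-place removal as the original.
--     centros = [(1,0),(0,1),(1,2),(2,1)]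
--     if lugar_mod in lugares_dispo:
--         lugares_dispo.remove(lugar_mod)
--     actualizado = []
--     # Single pass by output index: the rotation is an index offset, no
--     # intermediate 'E'/'W' state list and no slice-based rotation.
--     for k in range(4):
--         if sentido == 1:
--             src = (k - 1) % 4
--         elif sentido == 0:
--             src = (k + 1) % 4
--         else:
--             src = k
--         if centros[src] in lugares_dispo:
--             actualizado.append(centros[k])
--     return actualizado
-- ===== Notes on version B (the rewrite author's own statement) =====
-- stated objective: simpler
-- what changed: Replaces the intermediate 'E'/'W' status list and the slice-based rotation plus second indexing loop by a single loop over the output index k that reads the rotation as an index offset (k∓1) % 4 directly.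
import Mathlib
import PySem

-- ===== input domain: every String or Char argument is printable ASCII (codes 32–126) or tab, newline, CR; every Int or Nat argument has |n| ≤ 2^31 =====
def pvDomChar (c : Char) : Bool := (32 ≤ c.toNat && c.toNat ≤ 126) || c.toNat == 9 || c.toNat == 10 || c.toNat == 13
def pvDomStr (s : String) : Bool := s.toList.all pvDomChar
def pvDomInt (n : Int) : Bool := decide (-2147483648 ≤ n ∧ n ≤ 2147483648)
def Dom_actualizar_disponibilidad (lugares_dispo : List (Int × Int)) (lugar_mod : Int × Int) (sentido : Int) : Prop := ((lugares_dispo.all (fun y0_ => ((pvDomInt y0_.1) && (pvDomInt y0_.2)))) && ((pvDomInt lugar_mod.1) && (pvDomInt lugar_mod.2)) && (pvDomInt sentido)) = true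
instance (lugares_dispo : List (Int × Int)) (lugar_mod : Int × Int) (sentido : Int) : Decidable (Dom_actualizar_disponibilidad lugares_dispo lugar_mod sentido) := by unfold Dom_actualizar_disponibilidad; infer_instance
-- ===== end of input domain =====

-- B replaces the 'E'/'W' status list, the slice rotation and the second indexing
-- loop by one loop over the output index using an index offset (simpler; same cost).
-- Both programs mutate lugares_dispo in place identically (the guarded remove);
-- the equivalence proved here is about the return value.

-- shared mutation step: `if lugar_mod in lugares_dispo: lugares_dispo.remove(lugar_mod)`
def pvRemove (lugares : List (Int × Int)) (lugar : Int × Int) : List (Int × Int) :=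
  if lugar ∈ lugares then (PySem.List.remove? lugares lugar).getD [] else lugares

def pvCentros : List (Int × Int) := [(1,0),(0,1),(1,2),(2,1)]

-- ===== PORT A =====
def actualizar_disponibilidad (lugares_dispo : List (Int × Int)) (lugar_mod : Int × Int) (sentido : Int) : List (Int × Int) :=
  let ld := pvRemove lugares_dispo lugar_mod
  let acomodar : List String :=
    pvCentros.foldl (fun acc c => if c ∉ ld then acc ++ ["W"] else acc ++ ["E"]) []
  let acomodar :=
    if sentido == 1 then (PySem.List.pyGet? acomodar (-1)).toList ++ PySem.List.slice acomodar none (some (-1))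
    else if sentido == 0 then PySem.List.slice acomodar (some 1) none ++ (PySem.List.pyGet? acomodar 0).toList
    else acomodar
  (PySem.List.pyRange 0 (PySem.List.len acomodar) 1).foldl
    (fun acc k => if PySem.List.pyGetD acomodar k "" == "E" then acc ++ [PySem.List.pyGetD pvCentros k (0,0)] else acc) []

-- ===== PORT B =====
def actualizar_disponibilidad_alt (lugares_dispo : List (Int × Int)) (lugar_mod : Int × Int) (sentido : Int) : List (Int × Int) :=
  let ld := pvRemove lugares_dispo lugar_mod
  (PySem.List.pyRange 0 4 1).foldl
    (fun acc k =>
      let src : Int :=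
        if sentido == 1 then PySem.Int.mod (k - 1) 4
        else if sentido == 0 then PySem.Int.mod (k + 1) 4
        else k
      if PySem.List.pyGetD pvCentros src (0,0) ∈ ld then acc ++ [PySem.List.pyGetD pvCentros k (0,0)] else acc) []

-- ===== PRECONDITION & SPEC =====
def Spec_actualizar_disponibilidad (lugares_dispo : List (Int × Int)) (lugar_mod : Int × Int) (sentido : Int) (out : List (Int × Int)) : Prop := out = actualizar_disponibilidad_alt lugares_dispo lugar_mod sentido
instance (lugares_dispo : List (Int × Int)) (lugar_mod : Int × Int) (sentido : Int) (out : List (Int × Int)) : Decidable (Spec_actualizar_disponibilidad lugares_dispo lugar_mod sentido out) := by unfold Spec_actualizar_disponibilidad; infer_instance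

-- ===== CLAIM (what is proved, stated in full; the proofs are below) =====
def Claim_equal_actualizar_disponibilidad : Prop := ∀ (lugares_dispo : List (Int × Int)) (lugar_mod : Int × Int) (sentido : Int), Dom_actualizar_disponibilidad lugares_dispo lugar_mod sentido → Spec_actualizar_disponibilidad lugares_dispo lugar_mod sentido (actualizar_disponibilidad lugares_dispo lugar_mod sentido)

-- ===== LEMMAS AND PROOFS =====

-- ===== VERDICT (by name: the statement is the Claim_ definition above) =====
set_option maxHeartbeats 1000000 in
theorem actualizar_disponibilidad_spec : Claim_equal_actualizar_disponibilidad := by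
  intro L lm s _
  unfold Spec_actualizar_disponibilidad actualizar_disponibilidad actualizar_disponibilidad_alt
  generalize pvRemove L lm = ld
  by_cases h0 : ((1:Int),(0:Int)) ∈ ld <;>
  by_cases h1 : ((0:Int),(1:Int)) ∈ ld <;>
  by_cases h2 : ((1:Int),(2:Int)) ∈ ld <;>
  by_cases h3 : ((2:Int),(1:Int)) ∈ ld <;>
  by_cases hs1 : s = 1 <;> by_cases hs0 : s = 0 <;>
  first
  | omega
  | simp [pvCentros, h0, h1, h2, h3, hs1, hs0,
      show PySem.List.pyRange 0 4 1 = [0,1,2,3] from by decide,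
      show ∀ a : Int, PySem.Int.mod a 4 = a.emod 4 from fun a => PySem.Int.mod_eq_emod_of_pos (by norm_num),
      PySem.List.slice, PySem.List.pyGet?, PySem.List.pyGetD, PySem.List.pyIdx?, PySem.List.len, List.foldl]
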